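-- pv_equiv track=rewrite | github.com/r20213/Tiny-GRPO | create_dataset.py | build_think
-- ===== SOURCE A (Python) =====
-- def build_think(numbers: list[int]) -> str:
--     """Build strict chain: a+b = s1 + c = s2 ..."""
--     if len(numbers) == 1:
--         return f"{numbers[0]}"
--     parts = []
--     running = numbers[0]
--     for i, n in enumerate(numbers[1:], 1):
--         new_sum = running + n
--         if i == 1:
--             parts.append(f"{running}+{n} = {new_sum}")
--         else:
--             parts.append(f"+ {n} = {new_sum}")
--         running = new_sum
--     return " ".join(parts)
-- ===== SOURCE B (Python) =====
-- def build_think(numbers: list[int]) -> str: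
--     """Build strict chain: a+b = s1 + c = s2 ..."""
--     if len(numbers) == 1:
--         return f"{numbers[0]}"
--     sums = []
--     t = 0
--     for n in numbers:
--         t += n
--         sums.append(t)
--     parts = []
--     for k in range(1, len(numbers)):
--         if k == 1:
--             parts.append(f"{numbers[0]}+{numbers[1]} = {sums[1]}")
--         else:
--             parts.append(f"+ {numbers[k]} = {sums[k]}")
--     return " ".join(parts)
-- ===== Notes on version B (the rewrite author's own statement) =====
-- stated objective: alternative
-- what changed: B replaces the single inline running-accumulator loop with two separate passes: one that precomputes the prefix-sum table, and one that formats each part purely by index from that table.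
import Mathlib
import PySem

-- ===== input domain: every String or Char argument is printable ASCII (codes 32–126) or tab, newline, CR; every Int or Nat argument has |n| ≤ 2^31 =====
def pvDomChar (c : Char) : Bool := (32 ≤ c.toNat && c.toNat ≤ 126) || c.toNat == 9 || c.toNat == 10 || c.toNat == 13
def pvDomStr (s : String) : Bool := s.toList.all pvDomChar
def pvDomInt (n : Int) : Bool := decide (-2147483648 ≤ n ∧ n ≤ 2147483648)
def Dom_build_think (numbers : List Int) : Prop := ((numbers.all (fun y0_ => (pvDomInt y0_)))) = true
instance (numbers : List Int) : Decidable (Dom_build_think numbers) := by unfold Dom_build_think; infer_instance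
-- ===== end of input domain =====

-- B replaces A's inline running accumulator by a precomputed prefix-sum table read by index; return values only.

-- ===== PORT A =====
def build_think (numbers : List Int) : String :=
  if numbers.length = 1 then
    PySem.Int.toStr ((PySem.List.pyGet? numbers 0).getD 0)
  else
    let running := (PySem.List.pyGet? numbers 0).getD 0
    let st := (PySem.List.enumerate (numbers.drop 1) 1).foldl
      (fun (s : List String × Int) p =>
        let new_sum := s.2 + p.2
        let part := if p.1 = 1 then
            PySem.Int.toStr s.2 ++ "+" ++ PySem.Int.toStr p.2 ++ " = " ++ PySem.Int.toStr new_sum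
          else
            "+ " ++ PySem.Int.toStr p.2 ++ " = " ++ PySem.Int.toStr new_sum
        (s.1 ++ [part], new_sum))
      (([] : List String), running)
    PySem.Str.join " " st.1

-- ===== PORT B =====
def build_think_alt (numbers : List Int) : String :=
  if numbers.length = 1 then
    PySem.Int.toStr ((PySem.List.pyGet? numbers 0).getD 0)
  else
    let sums := (numbers.foldl (fun (s : List Int × Int) n => (s.1 ++ [s.2 + n], s.2 + n))
      (([] : List Int), (0 : Int))).1
    let parts := (PySem.List.pyRange 1 numbers.length 1).foldl
      (fun (acc : List String) k =>
        acc ++ [if k = 1 then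
            PySem.Int.toStr (PySem.List.pyGetD numbers 0 0) ++ "+" ++
              PySem.Int.toStr (PySem.List.pyGetD numbers 1 0) ++ " = " ++
              PySem.Int.toStr (PySem.List.pyGetD sums 1 0)
          else
            "+ " ++ PySem.Int.toStr (PySem.List.pyGetD numbers k 0) ++ " = " ++
              PySem.Int.toStr (PySem.List.pyGetD sums k 0)]) []
    PySem.Str.join " " parts

-- ===== PRECONDITION & SPEC =====
-- Pre_ excludes exactly the empty list, on which A raises IndexError (it reads numbers[0]).
def Pre_build_think (numbers : List Int) : Prop := numbers ≠ []
instance (numbers : List Int) : Decidable (Pre_build_think numbers) := by unfold Pre_build_think; infer_instance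
def pvWitness_build_think : List Int := ([1, 2, 3] : List Int)

def Spec_build_think (numbers : List Int) (out : String) : Prop := out = build_think_alt numbers
instance (numbers : List Int) (out : String) : Decidable (Spec_build_think numbers out) := by unfold Spec_build_think; infer_instance

-- ===== CLAIM (what is proved, stated in full; the proofs are below) =====
def Claim_equal_build_think : Prop := ∀ (numbers : List Int), Dom_build_think numbers → Pre_build_think numbers → Spec_build_think numbers (build_think numbers)

-- ===== LEMMAS AND PROOFS =====

-- the common "tail" parts, each item "+ n = r+n"
def chainParts (r : Int) : List Int → List String
  | [] => []
  | n :: rest => ("+ " ++ PySem.Int.toStr n ++ " = " ++ PySem.Int.toStr (r + n)) :: chainParts (r + n) rest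

-- prefix sums starting from t
def psums (t : Int) : List Int → List Int
  | [] => []
  | n :: rest => (t + n) :: psums (t + n) rest

theorem psums_append (t : Int) (xs ys : List Int) :
    psums t (xs ++ ys) = psums t xs ++ psums (t + xs.sum) ys := by
  induction xs generalizing t with
  | nil => simp [psums]
  | cons x xs ih => simp [psums, ih, add_assoc]

theorem length_psums (t : Int) (l : List Int) : (psums t l).length = l.length := by
  induction l generalizing t with
  | nil => rfl
  | cons x xs ih => simp [psums, ih]

theorem sums_fold (l : List Int) (acc : List Int) (t : Int) :
    l.foldl (fun (s : List Int × Int) n => (s.1 ++ [s.2 + n], s.2 + n)) (acc, t)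
      = (acc ++ psums t l, t + l.sum) := by
  induction l generalizing acc t with
  | nil => simp [psums]
  | cons x xs ih => simp [psums, ih, add_assoc]

theorem a_fold (l : List Int) (i : Int) (hi : 2 ≤ i) (ps : List String) (r : Int) :
    (PySem.List.enumerate l i).foldl
      (fun (s : List String × Int) p =>
        (s.1 ++ [if p.1 = 1 then
            PySem.Int.toStr s.2 ++ "+" ++ PySem.Int.toStr p.2 ++ " = " ++ PySem.Int.toStr (s.2 + p.2)
          else
            "+ " ++ PySem.Int.toStr p.2 ++ " = " ++ PySem.Int.toStr (s.2 + p.2)], s.2 + p.2)) (ps, r)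
      = (ps ++ chainParts r l, r + l.sum) := by
  induction l generalizing i ps r with
  | nil => simp [chainParts, PySem.List.enumerate_nil]
  | cons n rest ih =>
    rw [PySem.List.enumerate_cons]
    simp only [List.foldl_cons]
    have hne : ¬ (i = 1) := by omega
    simp only [hne, if_false]
    rw [ih (i + 1) (by omega)]
    simp [chainParts, add_assoc]

theorem a_val (x y : Int) (rest : List Int) :
    build_think (x :: y :: rest) = PySem.Str.join " "
      ((PySem.Int.toStr x ++ "+" ++ PySem.Int.toStr y ++ " = " ++ PySem.Int.toStr (x + y))
        :: chainParts (x + y) rest) := by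
  unfold build_think
  rw [if_neg (by simp)]
  simp only [List.drop_succ_cons, List.drop_zero, PySem.List.pyGet?_zero_cons, Option.getD_some,
    PySem.List.enumerate_cons, List.foldl_cons]
  rw [a_fold rest (1 + 1) (by omega)]
  simp

theorem b_fold (ks : List Int) (g : Int → String) (acc : List String) :
    ks.foldl (fun (a : List String) k => a ++ [g k]) acc = acc ++ ks.map g := by
  induction ks generalizing acc with
  | nil => simp
  | cons k ks ih => simp [ih]

theorem b_range (suf pre : List Int) (h2 : 2 ≤ pre.length) :
    (PySem.List.pyRange pre.length (pre.length + suf.length) 1).map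
      (fun k => if k = 1 then
          PySem.Int.toStr (PySem.List.pyGetD (pre ++ suf) 0 0) ++ "+" ++
            PySem.Int.toStr (PySem.List.pyGetD (pre ++ suf) 1 0) ++ " = " ++
            PySem.Int.toStr (PySem.List.pyGetD (psums 0 (pre ++ suf)) 1 0)
        else
          "+ " ++ PySem.Int.toStr (PySem.List.pyGetD (pre ++ suf) k 0) ++ " = " ++
            PySem.Int.toStr (PySem.List.pyGetD (psums 0 (pre ++ suf)) k 0))
      = chainParts (pre.sum) suf := by
  induction suf generalizing pre with
  | nil => simp [chainParts, PySem.List.pyRange_one_eq_nil]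
  | cons n rest ih =>
    have hlt : (pre.length : Int) < pre.length + (n :: rest).length := by
      simp only [List.length_cons]; push_cast; omega
    rw [PySem.List.pyRange_one_cons hlt, List.map_cons]
    have hne : ¬ ((pre.length : Int) = 1) := by
      intro h
      have : pre.length = 1 := by exact_mod_cast h
      omega
    have hget1 : PySem.List.pyGetD (pre ++ n :: rest) (pre.length) 0 = n := by
      rw [PySem.List.pyGetD_natCast]
      simp [List.getD]
    have hget2 : PySem.List.pyGetD (psums 0 (pre ++ n :: rest)) (pre.length) 0 = pre.sum + n := by
      rw [PySem.List.pyGetD_natCast, psums_append]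
      have hlen : (psums 0 pre).length = pre.length := length_psums 0 pre
      simp [List.getD, hlen, psums]
    simp only [hne, if_false, hget1, hget2]
    rw [chainParts]
    congr 1
    have step : ((pre.length : Int) + (n :: rest).length) = ((pre ++ [n]).length : Int) + rest.length := by
      simp only [List.length_append, List.length_cons, List.length_nil]; push_cast; omega
    have hcast : ((pre.length : Int) + 1) = ((pre ++ [n]).length : Int) := by simp
    rw [step, hcast]
    have := ih (pre ++ [n]) (by simp only [List.length_append, List.length_cons, List.length_nil]; omega)
    simpa [List.append_assoc, List.sum_append] using this

theorem b_val (x y : Int) (rest : List Int) :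
    build_think_alt (x :: y :: rest) = PySem.Str.join " "
      ((PySem.Int.toStr x ++ "+" ++ PySem.Int.toStr y ++ " = " ++ PySem.Int.toStr (x + y))
        :: chainParts (x + y) rest) := by
  unfold build_think_alt
  rw [if_neg (by simp)]
  rw [sums_fold]
  simp only [List.nil_append]
  rw [b_fold]
  simp only [List.nil_append]
  congr 1
  rw [PySem.List.pyRange_one_cons (show (1:Int) < ((x :: y :: rest).length : Int) by
    simp only [List.length_cons]; push_cast; omega), List.map_cons]
  rw [if_pos rfl]
  have e0 : PySem.List.pyGetD (x :: y :: rest) 0 0 = x := PySem.List.pyGetD_zero_cons x (y :: rest) 0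
  have e1 : ∀ (a b : Int) (l : List Int), PySem.List.pyGetD (a :: b :: l) 1 0 = b := by
    intro a b l
    rw [show (1 : Int) = ((1 : Nat) : Int) from rfl, PySem.List.pyGetD_natCast]
    rfl
  have e2 : psums 0 (x :: y :: rest) = x :: (x + y) :: psums (x + y) rest := by
    simp [psums]
  congr 1
  · rw [e0, e1, e2, e1]
  · have hb := b_range rest [x, y] (by simp)
    have hxy : x :: y :: rest = ([x, y] : List Int) ++ rest := rfl
    rw [hxy]
    have hlen : ((([x, y] : List Int) ++ rest).length : Int) = (([x, y] : List Int).length : Int) + (rest.length : Int) := by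
      push_cast [List.length_append]; ring
    have hstart : (1 : Int) + 1 = ((([x, y] : List Int)).length : Int) := by simp
    rw [hlen, hstart]
    simpa using hb

-- ===== VERDICT (by name: the statement is the Claim_ definition above) =====
theorem build_think_spec : Claim_equal_build_think := by
  intro numbers _ hpre
  unfold Spec_build_think
  match numbers, hpre with
  | [x], _ => rfl
  | x :: y :: rest, _ => rw [a_val, b_val]
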